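-- pv_equiv track=rewrite | github.com/tuanphung2005/CTDLGT-Slide-PTIT | code/code-force/cay-nhi-phan/d_caynhiphantimkiem.py | solve
-- ===== SOURCE A (Python) =====
-- class Node:
--     def __init__(self, val):
--         self.val = val
--         self.left = None
--         self.right = None
--
-- def post_order(root, res):
--     if root:
--         post_order(root.left, res)
--         post_order(root.right, res)
--         res.append(str(root.val))
--
-- def insert_node(root, val):
--     if root is None:
--         return Node(val)
--     if val < root.val:
--         root.left = insert_node(root.left, val)
--     else:
--         root.right = insert_node(root.right, val)
--     return root
--
-- def solve(n, a):
--     root = None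
--     for val in a:
--         root = insert_node(root, val)
--
--     res = []
--     post_order(root, res)
--     res.append('')
--     return res
-- ===== SOURCE B (Python) =====
-- def solve(n, a):
--     # Quicksort-style partition recursion: post-order of the insertion BST
--     # without ever building the tree.
--     def post(xs):
--         if not xs:
--             return []
--         p = xs[0]
--         rest = xs[1:]
--         return post([x for x in rest if x < p]) + post([x for x in rest if x >= p]) + [str(p)]
--     return post(a) + ['']
-- ===== Notes on version B (the rewrite author's own statement) =====
-- stated objective: alternative
-- what changed: Replaces the pointer-based BST (node objects, repeated root-to-leaf insertions, recursive tree walk) by a quicksort-style partition recursion that emits the post-order directly from the list, never building a tree.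
import Mathlib
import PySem

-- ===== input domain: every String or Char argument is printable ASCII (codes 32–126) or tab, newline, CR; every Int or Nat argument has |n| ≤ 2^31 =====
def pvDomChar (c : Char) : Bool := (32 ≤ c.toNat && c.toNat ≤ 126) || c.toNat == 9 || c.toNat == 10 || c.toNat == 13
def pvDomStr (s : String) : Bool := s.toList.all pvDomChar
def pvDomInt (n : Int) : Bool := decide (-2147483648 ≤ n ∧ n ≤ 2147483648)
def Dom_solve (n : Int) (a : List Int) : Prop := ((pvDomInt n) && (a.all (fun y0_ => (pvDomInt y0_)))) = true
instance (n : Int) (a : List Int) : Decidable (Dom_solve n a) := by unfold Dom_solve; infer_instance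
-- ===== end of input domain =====

-- B replaces the pointer BST + insertions + tree walk of A by a quicksort-style
-- partition recursion emitting the post-order directly from the list (alternative, same cost).


-- ===== PORT A =====
inductive BTree where
  | leaf : BTree
  | node : Int → BTree → BTree → BTree
deriving DecidableEq, Repr

def insertNode : BTree → Int → BTree
  | .leaf, v => .node v .leaf .leaf
  | .node w l r, v =>
      if v < w then .node w (insertNode l v) r
      else .node w l (insertNode r v)

-- post_order(root, res): appends to res; ported as a function returning the grown list
def postOrderA : BTree → List String → List String
  | .leaf, res => res
  | .node v l r, res => (postOrderA r (postOrderA l res)) ++ [PySem.Int.toStr v]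

def solve (n : Int) (a : List Int) : List String :=
  postOrderA (a.foldl insertNode .leaf) [] ++ [""]

-- ===== PORT B =====
def postB : List Int → List String
  | [] => []
  | p :: rest =>
      postB (rest.filter (fun x => decide (x < p)))
        ++ postB (rest.filter (fun x => decide (p ≤ x)))
        ++ [PySem.Int.toStr p]
termination_by xs => xs.length
decreasing_by
  all_goals
    simp only [List.length_cons, Nat.lt_succ_iff]
    rw [List.length_unattach]
    exact (List.length_filter_le _ _).trans (by simp)

def solve_alt (n : Int) (a : List Int) : List String :=
  postB a ++ [""]

-- ===== PRECONDITION & SPEC =====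
def Spec_solve (n : Int) (a : List Int) (out : List String) : Prop := out = solve_alt n a
instance (n : Int) (a : List Int) (out : List String) : Decidable (Spec_solve n a out) := by unfold Spec_solve; infer_instance

-- ===== CLAIM (what is proved, stated in full; the proofs are below) =====
def Claim_equal_solve : Prop := ∀ (n : Int) (a : List Int), Dom_solve n a → Spec_solve n a (solve n a)

-- ===== LEMMAS AND PROOFS =====

-- Inserting a list into a node distributes: smaller values go left, the rest right.
theorem foldl_insert_node (xs : List Int) (p : Int) (l r : BTree) :
    xs.foldl insertNode (.node p l r)
      = .node p (List.foldl insertNode l (xs.filter (fun x => decide (x < p))))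
               (List.foldl insertNode r (xs.filter (fun x => decide (p ≤ x)))) := by
  induction xs generalizing l r with
  | nil => simp
  | cons x xs ih =>
    by_cases h : x < p
    · simp [insertNode, h, not_le.mpr h, ih]
    · simp [insertNode, h, not_lt.mp h, ih]

-- The accumulator of postOrderA is a prefix.
theorem postOrderA_acc (t : BTree) (res : List String) :
    postOrderA t res = res ++ postOrderA t [] := by
  induction t generalizing res with
  | leaf => simp [postOrderA]
  | node v l r ihl ihr =>
    simp only [postOrderA]
    rw [ihl res, ihr (res ++ postOrderA l []), ihr (postOrderA l [])]
    simp

theorem postOrderA_foldl_eq_postB (xs : List Int) :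
    postOrderA (xs.foldl insertNode .leaf) [] = postB xs := by
  induction hn : xs.length using Nat.strong_induction_on generalizing xs with
  | _ k ih =>
    cases xs with
    | nil => simp [postOrderA, postB]
    | cons p rest =>
      have h1 : rest.foldl insertNode (insertNode .leaf p)
          = .node p (List.foldl insertNode .leaf (rest.filter (fun x => decide (x < p))))
                   (List.foldl insertNode .leaf (rest.filter (fun x => decide (p ≤ x)))) := by
        simpa [insertNode] using foldl_insert_node rest p .leaf .leaf
      have hlt : (rest.filter (fun x => decide (x < p))).length < k := by
        subst hn
        exact Nat.lt_succ_of_le (List.length_filter_le _ _)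
      have hge : (rest.filter (fun x => decide (p ≤ x))).length < k := by
        subst hn
        exact Nat.lt_succ_of_le (List.length_filter_le _ _)
      simp only [List.foldl_cons, h1, postOrderA, postB]
      rw [postOrderA_acc,
        ih _ hlt _ rfl, ih _ hge _ rfl]

-- ===== VERDICT (by name: the statement is the Claim_ definition above) =====
theorem solve_spec : Claim_equal_solve := by
  intro n a _
  unfold Spec_solve solve solve_alt
  rw [postOrderA_foldl_eq_postB]
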